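-- pv_equiv track=rewrite | github.com/ahljljj/LeetCode | 244. Shortest Word Distance II.py | search
-- ===== SOURCE A (Python) =====
-- def search(nums, target):
--     l, r = 0, len(nums) - 1
--     while l + 1 < r:
--         m = (l + r) >> 1
--         if target < nums[m]:
--             r = m
--         else:
--             l = m
--     c1, c2 = abs(nums[l] - target), abs(nums[r] - target)
--     return c1 if c1 < c2 else c2
-- ===== SOURCE B (Python) =====
-- def search(nums, target):
--     # Narrow a window SEGMENT of the list (slices) instead of index pair (l, r).
--     seg = nums
--     while len(seg) > 2:
--         k = (len(seg) - 1) >> 1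
--         if target < seg[k]:
--             seg = seg[:k + 1]
--         else:
--             seg = seg[k:]
--     c1 = abs(seg[0] - target)
--     c2 = abs(seg[-1] - target)
--     return c1 if c1 < c2 else c2
-- ===== Notes on version B (the rewrite author's own statement) =====
-- stated objective: alternative
-- what changed: B narrows an explicit window segment of the list by slicing (seg[:k+1] / seg[k:]) in a recursion on the segment, instead of A's iterative binary search over an (l, r) index pair; proved to follow the same comparison path.
import Mathlib
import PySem

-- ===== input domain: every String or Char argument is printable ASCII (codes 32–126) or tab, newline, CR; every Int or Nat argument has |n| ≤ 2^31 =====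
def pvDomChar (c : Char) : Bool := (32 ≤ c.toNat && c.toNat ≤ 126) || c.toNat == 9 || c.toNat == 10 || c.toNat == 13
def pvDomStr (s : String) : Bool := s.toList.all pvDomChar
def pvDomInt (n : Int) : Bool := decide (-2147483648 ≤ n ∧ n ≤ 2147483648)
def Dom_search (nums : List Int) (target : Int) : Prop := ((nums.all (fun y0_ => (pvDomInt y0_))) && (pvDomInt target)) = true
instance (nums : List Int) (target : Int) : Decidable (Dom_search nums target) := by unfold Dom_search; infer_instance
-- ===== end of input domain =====

-- B replaces the index-pair (l, r) binary search by a recursion that narrows an explicit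
-- window SEGMENT of the list via slicing (alternative decomposition, same index path).

-- ===== PORT A =====
-- the while loop of A: state (l, r), result is the final (l, r)
def searchLoop (nums : List Int) (target l r : Int) : Int × Int :=
  if _h : l + 1 < r then
    let m := PySem.Int.floordiv (l + r) 2  -- (l + r) >> 1 = floor division by 2, exact
    if target < (PySem.List.pyGet? nums m).getD 0 then
      searchLoop nums target l m
    else
      searchLoop nums target m r
  else (l, r)
termination_by (r - l).toNat
decreasing_by
  · have h1 : PySem.Int.floordiv (l + r) 2 < r := by
      rw [PySem.Int.floordiv_lt_iff_lt_mul (by omega)]; omega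
    omega
  · have h2 : l + 1 ≤ PySem.Int.floordiv (l + r) 2 := by
      rw [PySem.Int.le_floordiv_iff_mul_le (by omega)]; omega
    omega

def search (nums : List Int) (target : Int) : Int :=
  let p := searchLoop nums target 0 ((nums.length : Int) - 1)
  let c1 := |(PySem.List.pyGet? nums p.1).getD 0 - target|
  let c2 := |(PySem.List.pyGet? nums p.2).getD 0 - target|
  if c1 < c2 then c1 else c2

-- ===== PORT B =====
-- the while loop of B: state is the current segment (a slice of nums)
def searchSeg (target : Int) (seg : List Int) : Int :=
  if _h : 2 < PySem.List.len seg then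
    let k := PySem.Int.floordiv (PySem.List.len seg - 1) 2  -- (len(seg) - 1) >> 1, exact
    if target < (PySem.List.pyGet? seg k).getD 0 then
      searchSeg target (PySem.List.slice seg none (some (k + 1)))   -- seg[:k+1]
    else
      searchSeg target (PySem.List.slice seg (some k) none)         -- seg[k:]
  else
    let c1 := |(PySem.List.pyGet? seg 0).getD 0 - target|
    let c2 := |(PySem.List.pyGet? seg (-1)).getD 0 - target|
    if c1 < c2 then c1 else c2
termination_by seg.length
decreasing_by
  · have hk : 1 ≤ PySem.Int.floordiv (PySem.List.len seg - 1) 2 ∧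
        PySem.Int.floordiv (PySem.List.len seg - 1) 2 < PySem.List.len seg - 1 := by
      constructor
      · rw [PySem.Int.le_floordiv_iff_mul_le (by omega)]
        simp [PySem.List.len_eq] at *; omega
      · rw [PySem.Int.floordiv_lt_iff_lt_mul (by omega)]
        simp [PySem.List.len_eq] at *; omega
    rw [PySem.List.slice_to seg (by omega)]
    simp [PySem.List.len_eq] at *; omega
  · have hk : 1 ≤ PySem.Int.floordiv (PySem.List.len seg - 1) 2 := by
      rw [PySem.Int.le_floordiv_iff_mul_le (by omega)]
      simp [PySem.List.len_eq] at *; omega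
    rw [PySem.List.slice_from seg (by omega)]
    simp [PySem.List.len_eq] at *; omega

def search_alt (nums : List Int) (target : Int) : Int :=
  searchSeg target nums

-- ===== PRECONDITION & SPEC =====
-- Pre_ excludes the empty list, on which Python A raises IndexError (nums[0] after the loop).
def Pre_search (nums : List Int) (target : Int) : Prop := nums ≠ []
instance (nums : List Int) (target : Int) : Decidable (Pre_search nums target) := by unfold Pre_search; infer_instance
def pvWitness_search : List Int × Int := ([1, 3, 5, 9], 4)

def Spec_search (nums : List Int) (target : Int) (out : Int) : Prop := out = search_alt nums target
instance (nums : List Int) (target : Int) (out : Int) : Decidable (Spec_search nums target out) := by unfold Spec_search; infer_instance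

-- ===== CLAIM (what is proved, stated in full; the proofs are below) =====
def Claim_equal_search : Prop := ∀ (nums : List Int) (target : Int), Dom_search nums target → Pre_search nums target → Spec_search nums target (search nums target)

-- ===== LEMMAS AND PROOFS =====
-- midpoint of A relative to the window start is B's midpoint offset
theorem mid_offset (l r : Int) :
    PySem.Int.floordiv (r - l) 2 = PySem.Int.floordiv (l + r) 2 - l := by
  have h1 : PySem.Int.floordiv (l + r) 2 * 2 ≤ l + r :=
    (PySem.Int.le_floordiv_iff_mul_le (by omega)).mp le_rfl
  have h2 : l + r < (PySem.Int.floordiv (l + r) 2 + 1) * 2 :=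
    (PySem.Int.floordiv_lt_iff_lt_mul (by omega)).mp (by omega)
  rw [PySem.Int.floordiv_eq_iff_of_pos (by omega)]
  omega

-- invariant: B's segment is the slice nums[l .. r] of A's index window
theorem searchSeg_eq_loop (nums : List Int) (target : Int) :
    ∀ (n : Nat) (l r : Int), 0 ≤ l → l ≤ r → r < (nums.length : Int) →
    (r - l).toNat = n →
    searchSeg target ((nums.drop l.toNat).take ((r - l).toNat + 1)) =
      (let p := searchLoop nums target l r
       let c1 := |(PySem.List.pyGet? nums p.1).getD 0 - target|
       let c2 := |(PySem.List.pyGet? nums p.2).getD 0 - target|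
       if c1 < c2 then c1 else c2) := by
  intro n
  induction n using Nat.strong_induction_on with
  | _ n ih =>
    intro l r h0 hlr hrlen hn
    set seg := (nums.drop l.toNat).take ((r - l).toNat + 1) with hsegdef
    have hslen : seg.length = (r - l).toNat + 1 := by
      simp [hsegdef]; omega
    rw [searchSeg, searchLoop]
    have hlen : PySem.List.len seg = (r - l) + 1 := by
      simp [PySem.List.len_eq, hslen]; omega
    by_cases h : l + 1 < r
    · rw [dif_pos (by omega : (2:Int) < PySem.List.len seg), dif_pos h]
      set m := PySem.Int.floordiv (l + r) 2 with hmdef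
      have hmk : PySem.Int.floordiv (PySem.List.len seg - 1) 2 = m - l := by
        rw [hlen]
        have : r - l + 1 - 1 = r - l := by omega
        rw [this, mid_offset]
      have hm1 : m < r := by
        rw [hmdef, PySem.Int.floordiv_lt_iff_lt_mul (by omega)]; omega
      have hm2 : l + 1 ≤ m := by
        rw [hmdef, PySem.Int.le_floordiv_iff_mul_le (by omega)]; omega
      -- the element B compares is the element A compares
      have hget : PySem.List.pyGet? seg (m - l) = PySem.List.pyGet? nums m := by
        rw [PySem.List.pyGet?_of_nonneg seg (by omega),
            PySem.List.pyGet?_of_nonneg nums (by omega), hsegdef,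
            List.getElem?_take, List.getElem?_drop]
        rw [if_pos (by omega)]
        congr 1
        omega
      rw [hmk]
      dsimp only
      rw [hget]
      by_cases hlt : target < (PySem.List.pyGet? nums m).getD 0
      · rw [if_pos hlt, if_pos hlt]
        have hseg' : PySem.List.slice seg none (some (m - l + 1)) =
            (nums.drop l.toNat).take ((m - l).toNat + 1) := by
          rw [PySem.List.slice_to seg (by omega), hsegdef, List.take_take]
          congr 1
          omega
        rw [hseg']
        exact ih ((m - l).toNat) (by omega) l m h0 (by omega) (by omega) rfl
      · rw [if_neg hlt, if_neg hlt]
        have hseg' : PySem.List.slice seg (some (m - l)) none =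
            (nums.drop m.toNat).take ((r - m).toNat + 1) := by
          rw [PySem.List.slice_from seg (by omega), hsegdef, List.drop_take,
              List.drop_drop]
          congr 1
          · omega
          · congr 1
            omega
        rw [hseg']
        exact ih ((r - m).toNat) (by omega) m r (by omega) (by omega) hrlen rfl
    · rw [dif_neg (by omega : ¬ (2:Int) < PySem.List.len seg), dif_neg h]
      have hg0 : PySem.List.pyGet? seg 0 = PySem.List.pyGet? nums l := by
        rw [PySem.List.pyGet?_of_nonneg seg (by omega),
            PySem.List.pyGet?_of_nonneg nums h0, hsegdef,
            List.getElem?_take, List.getElem?_drop]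
        rw [if_pos (by omega)]
        simp
      have hg1 : PySem.List.pyGet? seg (-1) = PySem.List.pyGet? nums r := by
        rw [PySem.List.pyGet?_neg_one, List.getLast?_eq_getElem?,
            PySem.List.pyGet?_of_nonneg nums (by omega), hslen, hsegdef,
            List.getElem?_take, List.getElem?_drop]
        rw [if_pos (by omega)]
        congr 1
        omega
      dsimp only
      rw [hg0, hg1]

-- ===== VERDICT (by name: the statement is the Claim_ definition above) =====
theorem search_spec : Claim_equal_search := by
  intro nums target _ hpre
  unfold Spec_search search search_alt
  have hlen : 1 ≤ nums.length := List.length_pos_of_ne_nil hpre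
  have := searchSeg_eq_loop nums target (((nums.length : Int) - 1 - 0).toNat) 0 ((nums.length : Int) - 1)
    (by omega) (by omega) (by omega) rfl
  have hseg : (nums.drop (0:Int).toNat).take (((nums.length : Int) - 1 - 0).toNat + 1) = nums := by
    simp; omega
  rw [hseg] at this
  rw [this]
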